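-- pv_equiv track=rewrite | github.com/huytq000605/GrindLC | Graph/Maximum Vacation Days/solution.py | maxVacationDays
-- ===== SOURCE A (Python) =====
-- from typing import List
--
-- def maxVacationDays(flights: List[List[int]], days: List[List[int]]) -> int:
--     weeks = len(days[0])
--     cities = len(flights)
--     dp = [-1 for _ in range(cities)]
--     dp[0] = 0
--     for v in range(cities):
--         if flights[0][v]: dp[v] = 0
--         flights[v][v] = 1
--     for w in range(weeks):
--         next_dp = [-1 for _ in range(cities)]
--         for u in range(cities):
--             if dp[u] < 0: continue
--             for v in range(cities):
--                 if not flights[u][v]: continue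
--                 next_dp[v] = max(next_dp[v], dp[u] + days[v][w])
--         dp = next_dp
--
--     return max(dp)
-- ===== SOURCE B (Python) =====
-- def maxVacationDays(flights, days):
--     n = len(flights)
--     weeks = len(days[0])
--     memo = {}
--
--     def reach(w, v):
--         # Best running vacation total with which one can be positioned at city v at the
--         # start of week w (a negative running total kills the state before the next
--         # week); None if no surviving way to be there.
--         if w == 0:
--             return 0 if v == 0 or flights[0][v] else None
--         if (w, v) not in memo:
--             best = None
--             for u in range(n):
--                 if u != v and not flights[u][v]:
--                     continue
--                 r = reach(w - 1, u)
--                 if r is None or r < 0: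
--                     continue
--                 t = r + days[v][w - 1]
--                 if best is None or t > best:
--                     best = t
--             memo[(w, v)] = best
--         return memo[(w, v)]
--
--     ans = -1
--     for v in range(n):
--         r = reach(weeks, v)
--         if r is not None and r > ans:
--             ans = r
--     return ans
-- ===== Notes on version B (the rewrite author's own statement) =====
-- stated objective: alternative
-- what changed: A runs a bottom-up week-by-week array DP pushing totals forward through a mutated flights matrix; B is a top-down memoized recursion reach(w, v) that pulls the best surviving running total from predecessors of v at week w-1, leaves flights unmutated, and takes the final max over reach(weeks, v).
-- outside the precondition, e.g. on maxVacationDays([[1, 0], [0, 0]], [[3], []]): A returns 3, B returns 3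
import Mathlib
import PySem

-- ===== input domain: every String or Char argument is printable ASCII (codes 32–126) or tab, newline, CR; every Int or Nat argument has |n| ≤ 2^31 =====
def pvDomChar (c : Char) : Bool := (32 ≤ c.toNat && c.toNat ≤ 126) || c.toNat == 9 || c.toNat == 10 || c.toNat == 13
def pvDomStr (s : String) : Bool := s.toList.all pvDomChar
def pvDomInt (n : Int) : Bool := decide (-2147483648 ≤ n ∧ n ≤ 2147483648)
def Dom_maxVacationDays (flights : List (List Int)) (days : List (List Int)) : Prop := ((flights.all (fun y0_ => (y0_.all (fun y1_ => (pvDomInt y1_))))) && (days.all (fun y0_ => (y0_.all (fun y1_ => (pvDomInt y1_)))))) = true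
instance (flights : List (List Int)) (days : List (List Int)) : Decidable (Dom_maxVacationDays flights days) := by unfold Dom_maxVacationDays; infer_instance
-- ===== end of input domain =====

-- B replaces A's bottom-up week-by-week array DP (with in-place diagonal mutation of `flights`)
-- by a top-down memoized recursion reach(w, v) pulling the best surviving running total from
-- predecessors; B does not mutate `flights` (the equivalence is about the return value only).
-- Objective: alternative.

-- ===== PORT A =====
-- init loop of A: conditional dp[v] := 0 and in-place diagonal mutation flights[v][v] := 1
def pvAInit (flights : List (List Int)) : List Int × List (List Int) :=
  (List.range flights.length).foldl
    (fun st v =>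
      let dp := if (st.2.getD 0 []).getD v 0 ≠ 0 then st.1.set v 0 else st.1
      let fl := st.2.set v ((st.2.getD v []).set v 1)
      (dp, fl))
    ((List.replicate flights.length (-1 : Int)).set 0 0, flights)

-- one iteration of A's week loop (u: push from each live source, v: scatter to targets)
def pvAWeek (fl days : List (List Int)) (cities : Nat) (dp : List Int) (w : Nat) : List Int :=
  (List.range cities).foldl
    (fun next_dp u =>
      if dp.getD u 0 < 0 then next_dp
      else
        (List.range cities).foldl
          (fun next_dp v =>
            if (fl.getD u []).getD v 0 = 0 then next_dp
            else next_dp.set v (max (next_dp.getD v 0) (dp.getD u 0 + (days.getD v []).getD w 0)))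
          next_dp)
    (List.replicate cities (-1 : Int))

def maxVacationDays (flights : List (List Int)) (days : List (List Int)) : Int :=
  let weeks := (days.getD 0 []).length
  let cities := flights.length
  let st := pvAInit flights
  let dp := (List.range weeks).foldl (pvAWeek st.2 days cities) st.1
  (PySem.List.max? dp (fun x => x)).getD 0

-- ===== PORT B =====
-- reach w v: B's memoized recursion (memoization is a cache and does not change the value
-- computed, so the port is the plain recursion on w)
def pvReach (flights days : List (List Int)) (n : Nat) : Nat → Nat → Option Int
  | 0, v => if v == 0 || (flights.getD 0 []).getD v 0 != 0 then some (0 : Int) else none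
  | w + 1, v =>
    (List.range n).foldl
      (fun best u =>
        if u ≠ v ∧ (flights.getD u []).getD v 0 = 0 then best
        else
          match pvReach flights days n w u with
          | none => best
          | some r =>
            if r < 0 then best
            else
              match best with
              | none => some (r + (days.getD v []).getD w 0)
              | some b =>
                if r + (days.getD v []).getD w 0 > b then
                  some (r + (days.getD v []).getD w 0)
                else some b)
      none

def maxVacationDays_alt (flights : List (List Int)) (days : List (List Int)) : Int :=
  let n := flights.length
  let weeks := (days.getD 0 []).length
  (List.range n).foldl
    (fun best v =>
      match pvReach flights days n weeks v with
      | none => best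
      | some r => if r > best then r else best)
    (-1)

-- ===== PRECONDITION & SPEC =====
-- Pre_ is the standard rectangular shape of the problem: at least one city, every flights row
-- covering all cities, a days row for every city, each such row covering every week.  A raises
-- IndexError on non-shaped input except when a too-short days row belongs to a city that is
-- never reached, where A happens to return; those ragged inputs are excluded too (see cites).
def Pre_maxVacationDays (flights : List (List Int)) (days : List (List Int)) : Prop :=
  0 < flights.length ∧
  (∀ row ∈ flights, flights.length ≤ row.length) ∧
  flights.length ≤ days.length ∧
  (∀ row ∈ days.take flights.length, (days.getD 0 []).length ≤ row.length)

instance (flights : List (List Int)) (days : List (List Int)) :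
    Decidable (Pre_maxVacationDays flights days) := by
  unfold Pre_maxVacationDays; infer_instance

def pvWitness_maxVacationDays : List (List Int) × List (List Int) :=
  ([[1, 1], [0, 1]], [[1, 3], [6, 0]])

def Spec_maxVacationDays (flights : List (List Int)) (days : List (List Int)) (out : Int) : Prop := out = maxVacationDays_alt flights days
instance (flights : List (List Int)) (days : List (List Int)) (out : Int) : Decidable (Spec_maxVacationDays flights days out) := by unfold Spec_maxVacationDays; infer_instance

-- ===== CLAIM (what is proved, stated in full; the proofs are below) =====
def Claim_equal_maxVacationDays : Prop := ∀ (flights : List (List Int)) (days : List (List Int)), Dom_maxVacationDays flights days → Pre_maxVacationDays flights days → Spec_maxVacationDays flights days (maxVacationDays flights days)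

-- ===== LEMMAS AND PROOFS =====

-- toOpt: the "alive" view of an A-state entry (≥ 0 ↦ some, else none)
def pvToOpt (x : Int) : Option Int := if 0 ≤ x then some x else none

-- clamp: the "alive" view of a B reach value
def pvClamp (o : Option Int) : Option Int :=
  match o with
  | none => none
  | some r => if 0 ≤ r then some r else none

-- floor: A's sentinel rendering of a B reach value
def pvFloor (o : Option Int) : Int :=
  match o with
  | none => -1
  | some b => max (-1) b

theorem pv_toOpt_floor (o : Option Int) : pvToOpt (pvFloor o) = pvClamp o := by
  cases o with
  | none => rfl
  | some b =>
    simp only [pvFloor, pvClamp, pvToOpt]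
    by_cases h : 0 ≤ b
    · rw [max_eq_right (by omega), if_pos h]
    · rw [max_eq_left (by omega), if_neg h, if_neg (by omega)]

theorem pv_getD_set_self (l : List Int) (i : Nat) (a v : Int) (h : i < l.length) :
    (l.set i a).getD i v = a := by
  simp [List.getD, h]

theorem pv_getD_set_ne (l : List Int) (i j : Nat) (a v : Int) (h : i ≠ j) :
    (l.set i a).getD j v = l.getD j v := by
  simp [List.getD, List.getElem?_set_ne, h]

theorem pv_getD_set_ne' (l : List (List Int)) (i j : Nat) (a : List Int) (h : i ≠ j) :
    (l.set i a).getD j [] = l.getD j [] := by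
  simp [List.getD, List.getElem?_set_ne, h]

theorem pv_foldl_max_assoc (a b : Int) (l : List Int) :
    l.foldl max (max a b) = max a (l.foldl max b) := by
  induction l generalizing b with
  | nil => rfl
  | cons x t ih => simp only [List.foldl_cons, max_assoc, ih]

-- inner loop of A: a pass over range m setting index v only at iteration v
theorem pv_setfold_char (p : Nat → Prop) [DecidablePred p] (g : Int → Nat → Int) :
    ∀ (m : Nat) (nd : List Int), m ≤ nd.length →
      (((List.range m).foldl
          (fun nd v => if p v then nd else nd.set v (g (nd.getD v 0) v)) nd).length = nd.length ∧
       ∀ j, ((List.range m).foldl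
          (fun nd v => if p v then nd else nd.set v (g (nd.getD v 0) v)) nd).getD j 0 =
            if j < m ∧ ¬ p j then g (nd.getD j 0) j else nd.getD j 0) := by
  intro m
  induction m with
  | zero => intro nd _; simp
  | succ m ih =>
    intro nd hm
    have hm' : m ≤ nd.length := Nat.le_of_succ_le hm
    obtain ⟨hlen, hchar⟩ := ih nd hm'
    rw [List.range_succ, List.foldl_append, List.foldl_cons, List.foldl_nil]
    set F := (List.range m).foldl
        (fun nd v => if p v then nd else nd.set v (g (nd.getD v 0) v)) nd with hF
    have hFm : F.getD m 0 = nd.getD m 0 := by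
      rw [hchar]; simp only [Nat.lt_irrefl, false_and, if_false]
    constructor
    · split_ifs with h
      · exact hlen
      · rw [List.length_set]; exact hlen
    · intro j
      by_cases hj : j = m
      · subst hj
        by_cases hp : p j
        · rw [if_pos hp, hFm, if_neg (by tauto)]
        · rw [if_neg hp, pv_getD_set_self _ _ _ _ (by rw [hlen]; omega), hFm,
              if_pos ⟨by omega, hp⟩]
      · have : (if p m then F else F.set m (g (F.getD m 0) m)).getD j 0 = F.getD j 0 := by
          split_ifs with h
          · rfl
          · exact pv_getD_set_ne _ _ _ _ _ (fun he => hj he.symm)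
        rw [this, hchar]
        have : (j < m + 1 ∧ ¬ p j) ↔ (j < m ∧ ¬ p j) := by
          constructor
          · rintro ⟨h1, h2⟩; exact ⟨by omega, h2⟩
          · rintro ⟨h1, h2⟩; exact ⟨by omega, h2⟩
        simp only [this]

-- outer loop of A: pointwise it is a conditional running max at every index
theorem pv_outerfold_char (fl days : List (List Int)) (cities : Nat) (dp : List Int) (w : Nat) :
    ∀ (us : List Nat) (nd : List Int), nd.length = cities →
      ((us.foldl
          (fun next_dp u =>
            if dp.getD u 0 < 0 then next_dp
            else
              (List.range cities).foldl
                (fun next_dp v =>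
                  if (fl.getD u []).getD v 0 = 0 then next_dp
                  else next_dp.set v (max (next_dp.getD v 0) (dp.getD u 0 + (days.getD v []).getD w 0)))
                next_dp) nd).length = cities ∧
       ∀ j, j < cities →
        (us.foldl
          (fun next_dp u =>
            if dp.getD u 0 < 0 then next_dp
            else
              (List.range cities).foldl
                (fun next_dp v =>
                  if (fl.getD u []).getD v 0 = 0 then next_dp
                  else next_dp.set v (max (next_dp.getD v 0) (dp.getD u 0 + (days.getD v []).getD w 0)))
                next_dp) nd).getD j 0 =
          us.foldl
            (fun acc u =>
              if 0 ≤ dp.getD u 0 ∧ ¬ (fl.getD u []).getD j 0 = 0 then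
                max acc (dp.getD u 0 + (days.getD j []).getD w 0)
              else acc)
            (nd.getD j 0)) := by
  intro us
  induction us with
  | nil => intro nd h; exact ⟨h, fun j _ => rfl⟩
  | cons u t ih =>
    intro nd hnd
    simp only [List.foldl_cons]
    by_cases hu : dp.getD u 0 < 0
    · rw [if_pos hu]
      obtain ⟨h1, h2⟩ := ih nd hnd
      refine ⟨h1, fun j hj => ?_⟩
      rw [h2 j hj, if_neg (by omega)]
    · rw [if_neg hu]
      obtain ⟨hslen, hschar⟩ := pv_setfold_char
        (fun v => (fl.getD u []).getD v 0 = 0)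
        (fun acc v => max acc (dp.getD u 0 + (days.getD v []).getD w 0))
        cities nd (by omega)
      obtain ⟨h1, h2⟩ := ih _ (by rw [hslen, hnd])
      refine ⟨h1, fun j hj => ?_⟩
      rw [h2 j hj, hschar j]
      have hu' : 0 ≤ dp.getD u 0 := by omega
      have hinit : (if j < cities ∧ ¬ (fl.getD u []).getD j 0 = 0 then
            max (nd.getD j 0) (dp.getD u 0 + (days.getD j []).getD w 0) else nd.getD j 0) =
          (if 0 ≤ dp.getD u 0 ∧ ¬ (fl.getD u []).getD j 0 = 0 then
            max (nd.getD j 0) (dp.getD u 0 + (days.getD j []).getD w 0) else nd.getD j 0) := by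
        by_cases hfe : (fl.getD u []).getD j 0 = 0
        · rw [if_neg (by tauto), if_neg (by tauto)]
        · rw [if_pos ⟨hj, hfe⟩, if_pos ⟨hu', hfe⟩]
      rw [hinit]

-- the per-index value of one week of A, as a conditional running max over sources
theorem pvAWeek_char (fl days : List (List Int)) (cities : Nat) (dp : List Int) (w : Nat) :
    (pvAWeek fl days cities dp w).length = cities ∧
    ∀ j, j < cities →
      (pvAWeek fl days cities dp w).getD j 0 =
        (List.range cities).foldl
          (fun acc u =>
            if 0 ≤ dp.getD u 0 ∧ ¬ (fl.getD u []).getD j 0 = 0 then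
              max acc (dp.getD u 0 + (days.getD j []).getD w 0)
            else acc)
          (-1) := by
  obtain ⟨h1, h2⟩ := pv_outerfold_char fl days cities dp w (List.range cities)
    (List.replicate cities (-1)) (by simp)
  refine ⟨h1, fun j hj => ?_⟩
  rw [pvAWeek] at *
  have hrep : (List.replicate cities (-1 : Int)).getD j 0 = -1 := by
    rw [List.getD_eq_getElem _ _ (by simpa using hj)]; simp
  rw [h2 j hj, hrep]

-- a conditional running max never drops below its start
theorem pv_condfold_ge (q : Nat → Prop) [DecidablePred q] (val : Nat → Int) :
    ∀ (l : List Nat) (a : Int),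
      a ≤ l.foldl (fun acc u => if q u then max acc (val u) else acc) a := by
  intro l
  induction l with
  | nil => intro a; simp
  | cons x t ih =>
    intro a
    rw [List.foldl_cons]
    refine le_trans ?_ (ih _)
    split_ifs
    · exact le_max_left _ _
    · exact le_refl _

-- entries of A's state stay ≥ -1 through a week
theorem pvAWeek_ge (fl days : List (List Int)) (cities : Nat) (dp : List Int) (w : Nat) :
    ∀ x ∈ pvAWeek fl days cities dp w, -1 ≤ x := by
  obtain ⟨hlen, hchar⟩ := pvAWeek_char fl days cities dp w
  intro x hx
  obtain ⟨j, hj, hxj⟩ := List.mem_iff_getElem.mp hx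
  rw [← List.getD_eq_getElem _ 0 hj] at hxj
  rw [hchar j (by omega)] at hxj
  rw [← hxj]
  exact pv_condfold_ge _ _ _ _

-- characterization of A's init loop: dp marks {0} ∪ N(0), flights gets a unit diagonal
theorem pvAInit_char (flights : List (List Int)) :
    (pvAInit flights).1.length = flights.length ∧
    (∀ u, (pvAInit flights).2.getD u [] =
      if u < flights.length then (flights.getD u []).set u 1 else flights.getD u []) ∧
    (∀ j, j < flights.length →
      (pvAInit flights).1.getD j 0 =
        if j = 0 ∨ (flights.getD 0 []).getD j 0 ≠ 0 then 0 else -1) := by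
  rw [pvAInit]
  set n := flights.length with hn
  have main : ∀ m, m ≤ n →
      (((List.range m).foldl
          (fun st v =>
            let dp := if (st.2.getD 0 []).getD v 0 ≠ 0 then st.1.set v 0 else st.1
            let fl := st.2.set v ((st.2.getD v []).set v 1)
            (dp, fl))
          ((List.replicate n (-1 : Int)).set 0 0, flights)).1.length = n ∧
       ((List.range m).foldl
          (fun st v =>
            let dp := if (st.2.getD 0 []).getD v 0 ≠ 0 then st.1.set v 0 else st.1
            let fl := st.2.set v ((st.2.getD v []).set v 1)
            (dp, fl))
          ((List.replicate n (-1 : Int)).set 0 0, flights)).2.length = n ∧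
       (∀ u, ((List.range m).foldl
          (fun st v =>
            let dp := if (st.2.getD 0 []).getD v 0 ≠ 0 then st.1.set v 0 else st.1
            let fl := st.2.set v ((st.2.getD v []).set v 1)
            (dp, fl))
          ((List.replicate n (-1 : Int)).set 0 0, flights)).2.getD u [] =
            if u < m then (flights.getD u []).set u 1 else flights.getD u []) ∧
       (∀ j, j < n →
        ((List.range m).foldl
          (fun st v =>
            let dp := if (st.2.getD 0 []).getD v 0 ≠ 0 then st.1.set v 0 else st.1
            let fl := st.2.set v ((st.2.getD v []).set v 1)
            (dp, fl))
          ((List.replicate n (-1 : Int)).set 0 0, flights)).1.getD j 0 =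
            if j = 0 ∨ (j < m ∧ (flights.getD 0 []).getD j 0 ≠ 0) then 0 else -1)) := by
    intro m
    induction m with
    | zero =>
      intro _
      refine ⟨by simp, by simp [hn], fun u => by simp, fun j hj => ?_⟩
      simp only [List.range_zero, List.foldl_nil]
      by_cases hj0 : j = 0
      · subst hj0
        rw [pv_getD_set_self _ _ _ _ (by rw [List.length_replicate]; omega)]
        simp
      · rw [pv_getD_set_ne _ _ _ _ _ (fun he => hj0 he.symm)]
        have hrep : (List.replicate n (-1 : Int)).getD j 0 = -1 := by
          rw [List.getD_eq_getElem _ _ (by simpa using hj)]; simp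
        rw [hrep, if_neg (fun hor => hor.elim (fun h => hj0 h) (fun hh => absurd hh.1 (by omega)))]
    | succ m ih =>
      intro hm
      have hm' : m ≤ n := by omega
      obtain ⟨hdlen, hflen, hfl, hdp⟩ := ih hm'
      rw [List.range_succ, List.foldl_append, List.foldl_cons, List.foldl_nil]
      set st := (List.range m).foldl
          (fun st v =>
            let dp := if (st.2.getD 0 []).getD v 0 ≠ 0 then st.1.set v 0 else st.1
            let fl := st.2.set v ((st.2.getD v []).set v 1)
            (dp, fl))
          ((List.replicate n (-1 : Int)).set 0 0, flights) with hst
      have hcond : (st.2.getD 0 []).getD m 0 = (flights.getD 0 []).getD m 0 := by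
        rw [hfl 0]
        by_cases h0m : 0 < m
        · rw [if_pos h0m, pv_getD_set_ne _ _ _ _ _ (by omega)]
        · have : m = 0 := by omega
          subst this
          simp
      refine ⟨?_, ?_, ?_, ?_⟩
      · split_ifs
        · rw [List.length_set]; exact hdlen
        · exact hdlen
      · rw [List.length_set]; exact hflen
      · intro u
        by_cases hu : u = m
        · subst hu
          rw [List.getD_eq_getElem _ _ (by simp only [List.length_set, hflen]; omega)]
          rw [List.getElem_set_self (by simp only [List.length_set, hflen]; omega)]
          rw [hfl u, if_neg (by omega), if_pos (by omega)]
        · rw [pv_getD_set_ne' _ _ _ _ (fun he => hu he.symm), hfl u]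
          have : (u < m + 1) ↔ (u < m) := by omega
          simp only [this]
      · intro j hj
        dsimp only
        by_cases hjm : j = m
        · subst hjm
          by_cases hc : (st.2.getD 0 []).getD j 0 ≠ 0
          · rw [if_pos hc]
            rw [pv_getD_set_self _ _ _ _ (by rw [hdlen]; omega)]
            rw [hcond] at hc
            rw [if_pos (Or.inr ⟨by omega, hc⟩)]
          · rw [if_neg hc, hdp j hj]
            rw [hcond] at hc
            have hc' : (flights.getD 0 []).getD j 0 = 0 := by
              by_contra hne; exact hc hne
            by_cases hj0 : j = 0
            · simp [hj0]
            · rw [if_neg (fun hor => hor.elim (fun h => hj0 h) (fun hh => hh.2 hc')),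
                  if_neg (fun hor => hor.elim (fun h => hj0 h) (fun hh => hh.2 hc'))]
        · have : (if (st.2.getD 0 []).getD m 0 ≠ 0 then st.1.set m 0 else st.1).getD j 0 =
              st.1.getD j 0 := by
            split_ifs
            · exact pv_getD_set_ne _ _ _ _ _ (fun he => hjm he.symm)
            · rfl
          rw [this, hdp j hj]
          have : (j = 0 ∨ (j < m + 1 ∧ (flights.getD 0 []).getD j 0 ≠ 0)) ↔
                 (j = 0 ∨ (j < m ∧ (flights.getD 0 []).getD j 0 ≠ 0)) := by
            constructor
            · rintro (h | ⟨h1, h2⟩); · exact Or.inl h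
              · exact Or.inr ⟨by omega, h2⟩
            · rintro (h | ⟨h1, h2⟩); · exact Or.inl h
              · exact Or.inr ⟨by omega, h2⟩
          simp only [this]
  obtain ⟨h1, _, h3, h4⟩ := main n (le_refl n)
  refine ⟨h1, fun u => ?_, fun j hj => ?_⟩
  · exact h3 u
  · rw [h4 j hj]
    have : (j = 0 ∨ (j < n ∧ (flights.getD 0 []).getD j 0 ≠ 0)) ↔
           (j = 0 ∨ (flights.getD 0 []).getD j 0 ≠ 0) := by tauto
    simp only [this]

-- after init, row u of flights has its diagonal entry forced to 1
theorem pv_edge_iff (flights : List (List Int))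
    (hrow : ∀ row ∈ flights, flights.length ≤ row.length)
    (u v : Nat) (hu : u < flights.length) (hv : v < flights.length) :
    ((pvAInit flights).2.getD u []).getD v 0 ≠ 0 ↔
      (u = v ∨ (flights.getD u []).getD v 0 ≠ 0) := by
  obtain ⟨_, hfl, _⟩ := pvAInit_char flights
  rw [hfl u, if_pos hu]
  have hmem : flights.getD u [] ∈ flights := by
    rw [List.getD_eq_getElem _ _ hu]; exact List.getElem_mem _
  have hrl : flights.length ≤ (flights.getD u []).length := hrow _ hmem
  by_cases he : u = v
  · subst he
    rw [pv_getD_set_self _ _ _ _ (by omega)]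
    simp
  · rw [pv_getD_set_ne _ _ _ _ _ he]
    simp [he]

-- one step: A's conditional running max (from a floor) is the floor of B's Option running max
theorem pv_fold_inv (dp : List Int) (d : Int) (reachw : Nat → Option Int)
    (condA : Nat → Prop) [DecidablePred condA] (skipB : Nat → Prop) [DecidablePred skipB] :
    ∀ (l : List Nat),
      (∀ u ∈ l, pvClamp (reachw u) = pvToOpt (dp.getD u 0)) →
      (∀ u ∈ l, condA u ↔ (0 ≤ dp.getD u 0 ∧ ¬ skipB u)) →
      ∀ (best : Option Int),
        l.foldl (fun acc u => if condA u then max acc (dp.getD u 0 + d) else acc) (pvFloor best) =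
        pvFloor (l.foldl
          (fun best u =>
            if skipB u then best
            else
              match reachw u with
              | none => best
              | some r =>
                if r < 0 then best
                else
                  match best with
                  | none => some (r + d)
                  | some b => if r + d > b then some (r + d) else some b)
          best) := by
  intro l
  induction l with
  | nil => intro _ _ best; rfl
  | cons u t ih =>
    intro hcl hcn best
    have hclu := hcl u (by simp)
    have hcnu := hcn u (by simp)
    have hclT : ∀ x ∈ t, pvClamp (reachw x) = pvToOpt (dp.getD x 0) :=
      fun x hx => hcl x (List.mem_cons_of_mem _ hx)
    have hcnT : ∀ x ∈ t, condA x ↔ 0 ≤ dp.getD x 0 ∧ ¬ skipB x :=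
      fun x hx => hcn x (List.mem_cons_of_mem _ hx)
    rw [List.foldl_cons, List.foldl_cons]
    by_cases hs : skipB u
    · rw [if_pos hs, if_neg (fun hc => ((hcnu.mp hc).2) hs)]
      exact ih hclT hcnT best
    · rw [if_neg hs]
      cases hr : reachw u with
      | none =>
        have hdp : ¬ 0 ≤ dp.getD u 0 := by
          rw [hr] at hclu
          simp only [pvClamp, pvToOpt] at hclu
          by_cases h : 0 ≤ dp.getD u 0
          · rw [if_pos h] at hclu; exact absurd hclu (by simp)
          · exact h
        rw [if_neg (fun hc => hdp (hcnu.mp hc).1)]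
        dsimp only
        exact ih hclT hcnT best
      | some r =>
        by_cases hrneg : r < 0
        · have hdp : ¬ 0 ≤ dp.getD u 0 := by
            rw [hr] at hclu
            simp only [pvClamp, pvToOpt] at hclu
            rw [if_neg (by omega)] at hclu
            by_cases h : 0 ≤ dp.getD u 0
            · rw [if_pos h] at hclu; exact absurd hclu (by simp)
            · exact h
          rw [if_neg (fun hc => hdp (hcnu.mp hc).1)]
          dsimp only
          rw [if_pos hrneg]
          exact ih hclT hcnT best
        · have hdp : 0 ≤ dp.getD u 0 ∧ dp.getD u 0 = r := by
            rw [hr] at hclu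
            simp only [pvClamp, pvToOpt] at hclu
            rw [if_pos (by omega)] at hclu
            by_cases h : 0 ≤ dp.getD u 0
            · rw [if_pos h] at hclu
              exact ⟨h, (Option.some.inj hclu).symm⟩
            · rw [if_neg h] at hclu; exact absurd hclu (by simp)
          rw [if_pos (hcnu.mpr ⟨hdp.1, hs⟩), hdp.2]
          dsimp only
          rw [if_neg hrneg]
          have hfl : max (pvFloor best) (r + d) =
              pvFloor (match best with
                | none => some (r + d)
                | some b => if r + d > b then some (r + d) else some b) := by
            cases best with
            | none => rfl
            | some b =>
              dsimp only
              by_cases hb : r + d > b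
              · rw [if_pos hb]
                simp only [pvFloor]
                rw [max_assoc]
                congr 1
                omega
              · rw [if_neg hb]
                simp only [pvFloor]
                rw [max_assoc]
                congr 1
                omega
          rw [hfl]
          exact ih hclT hcnT _

-- main invariant: after w weeks, the clamp of B's reach is the alive view of A's dp
theorem pv_reach_char (flights days : List (List Int))
    (hrow : ∀ row ∈ flights, flights.length ≤ row.length) :
    ∀ (w : Nat),
      ((List.range w).foldl (pvAWeek (pvAInit flights).2 days flights.length)
          (pvAInit flights).1).length = flights.length ∧
      (∀ x ∈ (List.range w).foldl (pvAWeek (pvAInit flights).2 days flights.length)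
          (pvAInit flights).1, -1 ≤ x) ∧
      (∀ v, v < flights.length →
        pvClamp (pvReach flights days flights.length w v) =
          pvToOpt (((List.range w).foldl (pvAWeek (pvAInit flights).2 days flights.length)
            (pvAInit flights).1).getD v 0)) := by
  obtain ⟨hilen, hflchar, hichar⟩ := pvAInit_char flights
  intro w
  induction w with
  | zero =>
    refine ⟨by simpa using hilen, ?_, ?_⟩
    · intro x hx
      obtain ⟨j, hj, hxj⟩ := List.mem_iff_getElem.mp hx
      simp only [List.range_zero, List.foldl_nil] at hxj hj
      rw [← List.getD_eq_getElem _ 0 hj] at hxj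
      rw [hichar j (by omega)] at hxj
      rw [← hxj]
      split_ifs <;> omega
    · intro v hv
      simp only [List.range_zero, List.foldl_nil]
      rw [hichar v hv]
      simp only [pvReach]
      by_cases hc : v = 0 ∨ (flights.getD 0 []).getD v 0 ≠ 0
      · rw [if_pos hc, if_pos (by simpa [bne_iff_ne] using hc)]
        rfl
      · rw [if_neg hc, if_neg (by simpa [bne_iff_ne] using hc)]
        rfl
  | succ w ih =>
    obtain ⟨hlen, hge, hclamp⟩ := ih
    rw [List.range_succ, List.foldl_append, List.foldl_cons, List.foldl_nil]
    set S := (List.range w).foldl (pvAWeek (pvAInit flights).2 days flights.length)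
      (pvAInit flights).1 with hS
    obtain ⟨hAlen, hAchar⟩ :=
      pvAWeek_char (pvAInit flights).2 days flights.length S w
    refine ⟨hAlen, pvAWeek_ge _ _ _ _ _, ?_⟩
    intro v hv
    rw [hAchar v hv]
    have hinv := pv_fold_inv S ((days.getD v []).getD w 0)
      (pvReach flights days flights.length w)
      (fun u => 0 ≤ S.getD u 0 ∧ ¬ ((pvAInit flights).2.getD u []).getD v 0 = 0)
      (fun u => u ≠ v ∧ (flights.getD u []).getD v 0 = 0)
      (List.range flights.length)
      (fun u hu => hclamp u (List.mem_range.mp hu))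
      (fun u hu => by
        have hiff := pv_edge_iff flights hrow u v (List.mem_range.mp hu) hv
        tauto)
      none
    simp only [pvFloor] at hinv
    rw [hinv]
    rw [← pv_toOpt_floor]
    simp only [pvReach]
    rfl

-- max-fold over the index range equals max-fold over the list itself
theorem pv_range_fold_max : ∀ (l : List Int) (a : Int),
    (List.range l.length).foldl (fun b v => max b (l.getD v 0)) a = l.foldl max a := by
  intro l
  induction l with
  | nil => intro a; simp
  | cons x t ih =>
    intro a
    rw [List.length_cons, List.range_succ_eq_map, List.foldl_cons, List.foldl_map]
    simp only [List.getD_cons_zero, List.getD_cons_succ]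
    exact ih (max a x)

-- final loop of B equals the max-fold over A's final array (all entries ≥ -1)
theorem pv_final_fold (reach : Nat → Option Int) (dpA : List Int) :
    ∀ (l : List Nat),
      (∀ v ∈ l, pvClamp (reach v) = pvToOpt (dpA.getD v 0) ∧ -1 ≤ dpA.getD v 0) →
      ∀ (best : Int), -1 ≤ best →
        l.foldl (fun best v =>
            match reach v with
            | none => best
            | some r => if r > best then r else best) best =
        l.foldl (fun b v => max b (dpA.getD v 0)) best := by
  intro l
  induction l with
  | nil => intro _ best _; rfl
  | cons v t ih =>
    intro h best hbest
    obtain ⟨hcl, hge⟩ := h v (by simp)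
    have hT : ∀ x ∈ t, pvClamp (reach x) = pvToOpt (dpA.getD x 0) ∧ -1 ≤ dpA.getD x 0 :=
      fun x hx => h x (List.mem_cons_of_mem _ hx)
    rw [List.foldl_cons, List.foldl_cons]
    cases hr : reach v with
    | none =>
      have : dpA.getD v 0 = -1 := by
        rw [hr] at hcl
        simp only [pvClamp, pvToOpt] at hcl
        by_cases h0 : 0 ≤ dpA.getD v 0
        · rw [if_pos h0] at hcl; exact absurd hcl.symm (by simp)
        · omega
      rw [this, max_eq_left hbest]
      exact ih hT best hbest
    | some r =>
      by_cases hrn : r < 0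
      · have hdv : dpA.getD v 0 = -1 := by
          rw [hr] at hcl
          simp only [pvClamp, pvToOpt] at hcl
          rw [if_neg (by omega)] at hcl
          by_cases h0 : 0 ≤ dpA.getD v 0
          · rw [if_pos h0] at hcl; exact absurd hcl.symm (by simp)
          · omega
        dsimp only
        rw [hdv, max_eq_left hbest, if_neg (by omega)]
        exact ih hT best hbest
      · have hdv : dpA.getD v 0 = r := by
          rw [hr] at hcl
          simp only [pvClamp, pvToOpt] at hcl
          rw [if_pos (by omega)] at hcl
          by_cases h0 : 0 ≤ dpA.getD v 0
          · rw [if_pos h0] at hcl; exact (Option.some.inj hcl).symm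
          · rw [if_neg h0] at hcl; exact absurd hcl.symm (by simp)
        dsimp only
        rw [hdv]
        have : (if r > best then r else best) = max best r := by
          by_cases h0 : r > best
          · rw [if_pos h0, max_eq_right (by omega)]
          · rw [if_neg h0, max_eq_left (by omega)]
        rw [this]
        exact ih hT (max best r) (le_trans hbest (le_max_left _ _))

theorem maxVacationDays_spec : Claim_equal_maxVacationDays := by
  intro flights days _ hpre
  obtain ⟨h0, hrow, _, _⟩ := hpre
  unfold Spec_maxVacationDays maxVacationDays maxVacationDays_alt
  dsimp only
  obtain ⟨hlen, hge, hclamp⟩ := pv_reach_char flights days hrow (days.getD 0 []).length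
  set dpF := (List.range (days.getD 0 []).length).foldl
    (pvAWeek (pvAInit flights).2 days flights.length) (pvAInit flights).1 with hdpF
  rw [pv_final_fold (pvReach flights days flights.length (days.getD 0 []).length) dpF
    (List.range flights.length)
    (fun v hv => ⟨hclamp v (List.mem_range.mp hv), by
      have hvn : v < flights.length := List.mem_range.mp hv
      rw [List.getD_eq_getElem _ _ (by omega)]
      exact hge _ (List.getElem_mem _)⟩)
    (-1) (le_refl _)]
  rw [show flights.length = dpF.length from hlen.symm, pv_range_fold_max]
  cases hcase : dpF with
  | nil => rw [hcase] at hlen; simp at hlen; omega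
  | cons x t =>
    rw [PySem.List.max?_id_cons]
    simp only [Option.getD_some]
    rw [List.foldl_cons, pv_foldl_max_assoc]
    have hx : -1 ≤ x := by
      have := hge x (by rw [hcase]; simp)
      omega
    have hle : x ≤ t.foldl max x := (PySem.List.le_foldl_max t x).1
    rw [max_eq_right (by omega)]
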